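-- pv_equiv track=rewrite | github.com/Mercy2Green/m2g_vln | m2g_vln/preprocess/m2g_vln/get_object_feature.py | process_tag_classes
-- ===== SOURCE A (Python) =====
-- from typing import Any, List
--
-- def process_tag_classes(text_prompt:str, add_classes:List[str]=[], remove_classes:List[str]=[]) -> list[str]:
--     '''
--     Convert a text prompt from Tag2Text to a list of classes.
--     '''
--     classes = text_prompt.split(',')
--     classes = [obj_class.strip() for obj_class in classes]
--     classes = [obj_class for obj_class in classes if obj_class != '']
--
--     for c in add_classes:
--         if c not in classes:
--             classes.append(c)
--
--     for c in remove_classes: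
--         classes = [obj_class for obj_class in classes if c not in obj_class.lower()]
--
--     return classes
-- ===== SOURCE B (Python) =====
-- def process_tag_classes(text_prompt, add_classes=[], remove_classes=[]):
--     '''
--     Convert a text prompt from Tag2Text to a list of classes.
--     '''
--     def keep(obj):
--         low = obj.lower()
--         return not any(c in low for c in remove_classes)
--     # single character-level scan: tokenizes on commas while stripping
--     # whitespace incrementally (no split/strip/re-filter passes)
--     parsed = []
--     cur = []      # current token, leading whitespace already skipped
--     pend = []     # pending whitespace seen after the last non-space char
--     for ch in text_prompt + ',':
--         if ch == ',':
--             if cur: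
--                 parsed.append(''.join(cur))
--             cur, pend = [], []
--         elif ch.isspace():
--             if cur:
--                 pend.append(ch)
--         else:
--             cur += pend
--             cur.append(ch)
--             pend = []
--     seen = set(parsed)
--     new_adds = []
--     for c in add_classes:
--         if c not in seen:
--             seen.add(c)
--             new_adds.append(c)
--     return [x for x in parsed if keep(x)] + [c for c in new_adds if keep(c)]
-- ===== Notes on version B (the rewrite author's own statement) =====
-- stated objective: alternative
-- what changed: B replaces A's split/strip/filter passes over the text with a single character-level state machine that tokenizes on commas while stripping whitespace incrementally, replaces the growing-list membership add loop with a seen-set loop that collects only the new names, and builds the result as two independently filtered segments instead of A's m sequential remove-filter passes over one concatenated list.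
import Mathlib
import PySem

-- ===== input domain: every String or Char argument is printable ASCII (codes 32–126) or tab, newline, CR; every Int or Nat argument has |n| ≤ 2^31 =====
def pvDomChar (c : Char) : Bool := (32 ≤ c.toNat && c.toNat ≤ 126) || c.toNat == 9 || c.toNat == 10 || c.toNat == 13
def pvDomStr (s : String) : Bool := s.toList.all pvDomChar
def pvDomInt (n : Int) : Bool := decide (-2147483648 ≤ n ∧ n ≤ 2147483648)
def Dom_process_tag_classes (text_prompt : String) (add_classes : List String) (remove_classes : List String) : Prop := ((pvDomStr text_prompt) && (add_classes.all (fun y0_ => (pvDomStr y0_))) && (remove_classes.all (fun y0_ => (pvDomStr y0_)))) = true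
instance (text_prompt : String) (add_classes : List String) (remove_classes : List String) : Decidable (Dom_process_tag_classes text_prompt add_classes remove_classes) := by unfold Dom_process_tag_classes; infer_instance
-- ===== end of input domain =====

-- B replaces A's split/strip/filter passes by a single character-level state machine, the growing-list
-- membership add loop by a seen-set loop collecting only the new names, and the m sequential remove
-- passes by one filter applied to the two segments independently; same return value (no observable mutation).
-- ===== PORT A =====
def process_tag_classes (text_prompt : String) (add_classes : List String) (remove_classes : List String) : List String :=
  let classes := ((PySem.Str.split? text_prompt ",").getD []).map PySem.Str.strip
  let classes := classes.filter (fun obj => obj != "")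
  let classes := add_classes.foldl (fun cls c => if cls.contains c then cls else cls ++ [c]) classes
  let classes := remove_classes.foldl
    (fun cls c => cls.filter (fun obj => !(PySem.Str.isIn c (PySem.Str.lower obj)))) classes
  classes

-- ===== PORT B =====
-- Source B's keep predicate: obj survives iff no remove term occurs in obj.lower()
def pvKeep (remove_classes : List String) (obj : String) : Bool :=
  let low := PySem.Str.lower obj
  !(remove_classes.any (fun c => PySem.Str.isIn c low))

-- one step of Source B's character scan; state = (parsed tokens, current token, pending whitespace)
def pvStep (st : List String × List Char × List Char) (ch : Char) : List String × List Char × List Char :=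
  match st with
  | (parsed, cur, pend) =>
    if ch = ',' then
      (if cur.isEmpty then parsed else parsed ++ [String.ofList cur], [], [])
    else if PySem.Chars.isspace ch then
      (parsed, cur, if cur.isEmpty then pend else pend ++ [ch])
    else
      (parsed, cur ++ pend ++ [ch], [])

-- Source B's add loop: the suffix of genuinely new classes, tracked with a seen-set
def pvAddLoop (seen : PySem.Set String) : List String → List String
  | [] => []
  | c :: cs => if PySem.Set.contains seen c then pvAddLoop seen cs
               else c :: pvAddLoop (PySem.Set.add seen c) cs

def process_tag_classes_alt (text_prompt : String) (add_classes : List String) (remove_classes : List String) : List String :=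
  let parsed := ((text_prompt ++ ",").toList.foldl pvStep ([], [], [])).1
  let new_adds := pvAddLoop (PySem.Set.ofList parsed) add_classes
  parsed.filter (pvKeep remove_classes) ++ new_adds.filter (pvKeep remove_classes)

-- ===== PRECONDITION & SPEC =====
def Spec_process_tag_classes (text_prompt : String) (add_classes : List String) (remove_classes : List String) (out : List String) : Prop := out = process_tag_classes_alt text_prompt add_classes remove_classes
instance (text_prompt : String) (add_classes : List String) (remove_classes : List String) (out : List String) : Decidable (Spec_process_tag_classes text_prompt add_classes remove_classes out) := by unfold Spec_process_tag_classes; infer_instance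

-- ===== CLAIM (what is proved, stated in full; the proofs are below) =====
def Claim_equal_process_tag_classes : Prop := ∀ (text_prompt : String) (add_classes : List String) (remove_classes : List String), Dom_process_tag_classes text_prompt add_classes remove_classes → Spec_process_tag_classes text_prompt add_classes remove_classes (process_tag_classes text_prompt add_classes remove_classes)

-- ===== LEMMAS AND PROOFS =====

-- reference splitter at [','] : (first segment, remaining segments)
def pvSplitc : List Char → List Char × List (List Char)
  | [] => ([], [])
  | c :: rest =>
    let p := pvSplitc rest
    if c = ',' then ([], p.1 :: p.2) else (c :: p.1, p.2)

lemma pv_splitOn_go (l : List Char) : ∀ (fuel : Nat) (cur : List Char) (acc : List (List Char)),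
    l.length < fuel →
    PySem.Chars.splitOn.go [','] fuel l cur acc
      = acc.reverse ++ ((cur.reverse ++ (pvSplitc l).1) :: (pvSplitc l).2) := by
  induction l with
  | nil =>
    intro fuel cur acc h
    match fuel with
    | fuel + 1 => simp [PySem.Chars.splitOn.go, pvSplitc]
  | cons c rest ih =>
    intro fuel cur acc h
    match fuel with
    | fuel + 1 =>
      by_cases hc : c = ','
      · subst hc
        rw [PySem.Chars.splitOn.go]
        simp only [List.isPrefixOf, beq_self_eq_true, Bool.true_and,
          if_true, List.length_cons, List.drop_succ_cons, List.length_nil, List.drop_zero]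
        rw [ih fuel [] (cur.reverse :: acc) (by simpa using Nat.lt_of_succ_lt_succ h)]
        simp [pvSplitc]
      · rw [PySem.Chars.splitOn.go]
        have hpre : [','].isPrefixOf (c :: rest) = false := by
          simp [List.isPrefixOf]; exact fun h' => hc h'.symm
        simp only [hpre, Bool.false_eq_true, if_false]
        rw [ih fuel (c :: cur) acc (Nat.lt_of_succ_lt_succ h)]
        simp [pvSplitc, hc]

lemma pv_splitOn_eq (l : List Char) :
    PySem.Chars.splitOn l [','] = (pvSplitc l).1 :: (pvSplitc l).2 := by
  unfold PySem.Chars.splitOn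
  rw [pv_splitOn_go l (l.length + 1) [] [] (Nat.lt_succ_self _)]
  simp

-- trailing whitespace pending after a token that ends in a non-space char is exactly what rstrip removes
lemma pv_rstrip_append (cur pend : List Char)
    (hp : pend.all PySem.Chars.isspace)
    (hl : ∀ a, cur.getLast? = some a → PySem.Chars.isspace a = false) :
    PySem.Chars.rstrip (cur ++ pend) = cur := by
  unfold PySem.Chars.rstrip
  rw [List.reverse_append, List.dropWhile_append]
  have hpd : List.dropWhile PySem.Chars.isspace pend.reverse = [] := by
    rw [List.dropWhile_eq_nil_iff]
    intro x hx
    exact (List.all_eq_true.mp hp) x (List.mem_reverse.mp hx)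
  rw [hpd]
  simp only [List.isEmpty_nil, if_true]
  cases hcur : cur.reverse with
  | nil => simp [List.reverse_eq_nil_iff.mp hcur]
  | cons a t =>
    have hlast : cur.getLast? = some a := by
      rw [← List.head?_reverse, hcur]; rfl
    rw [List.dropWhile_cons_of_neg (by simp [hl a hlast]), ← hcur, List.reverse_reverse]

-- the token Source B's machine flushes for first-segment remainder h, given state (cur, pend)
def pvTok (cur pend h : List Char) : List String :=
  let t := PySem.Chars.rstrip (cur ++ pend ++ (if cur.isEmpty then PySem.Chars.lstrip h else h))
  if t.isEmpty then [] else [String.ofList t]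

-- what the machine will emit from state (cur, pend) on remaining input l (before the final flush comma)
def pvEmit (cur pend : List Char) (l : List Char) : List String :=
  pvTok cur pend (pvSplitc l).1 ++
    (((pvSplitc l).2.map PySem.Chars.strip).filter (fun t => !t.isEmpty)).map String.ofList

lemma pv_machine (l : List Char) : ∀ (parsed : List String) (cur pend : List Char),
    pend.all PySem.Chars.isspace →
    (∀ a, cur.getLast? = some a → PySem.Chars.isspace a = false) →
    ((l ++ [',']).foldl pvStep (parsed, cur, pend)).1 = parsed ++ pvEmit cur pend l := by
  induction l with
  | nil =>
    intro parsed cur pend hp hl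
    simp only [List.nil_append, List.foldl_cons, List.foldl_nil, pvStep, reduceIte]
    simp only [pvEmit, pvSplitc, pvTok]
    have : (if cur.isEmpty then PySem.Chars.lstrip [] else ([] : List Char)) = [] := by
      simp [PySem.Chars.lstrip]
    rw [this, List.append_nil, pv_rstrip_append cur pend hp hl]
    cases hc : cur.isEmpty <;> simp_all
  | cons c rest ih =>
    intro parsed cur pend hp hl
    by_cases hc : c = ','
    · subst hc
      simp only [List.cons_append, List.foldl_cons, pvStep, reduceIte]
      rw [ih _ [] [] (by simp) (by simp)]
      have hr : PySem.Chars.rstrip (cur ++ pend) = cur := pv_rstrip_append cur pend hp hl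
      simp only [pvEmit, pvSplitc, reduceIte, pvTok, List.isEmpty_nil, List.nil_append,
        List.append_nil, PySem.Chars.strip, List.map_cons, List.filter_cons]
      cases hce : cur.isEmpty <;>
        cases hts : (PySem.Chars.rstrip (PySem.Chars.lstrip (pvSplitc rest).1)).isEmpty <;>
          simp_all [List.append_assoc, PySem.Chars.lstrip]
    · by_cases hs : PySem.Chars.isspace c
      · simp only [List.cons_append, List.foldl_cons, pvStep, if_neg hc, if_pos hs]
        cases hce : cur.isEmpty
        · -- cur nonempty: whitespace goes to pend
          simp only [Bool.false_eq_true, if_false]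
          rw [ih parsed cur (pend ++ [c]) (by simp_all) hl]
          simp only [pvEmit, pvSplitc, if_neg hc, pvTok, hce]
          simp [List.append_assoc]
        · -- cur empty: leading whitespace dropped
          have hcur : cur = [] := List.isEmpty_iff.mp hce
          subst hcur
          simp only [if_true]
          rw [ih parsed [] pend hp hl]
          simp only [pvEmit, pvSplitc, if_neg hc, pvTok, List.isEmpty_nil]
          have : PySem.Chars.lstrip (c :: (pvSplitc rest).1)
              = PySem.Chars.lstrip (pvSplitc rest).1 := by
            simp [PySem.Chars.lstrip, hs]
          rw [this]
          simp
      · simp only [List.cons_append, List.foldl_cons, pvStep, if_neg hc, if_neg hs]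
        rw [ih parsed (cur ++ pend ++ [c]) [] (by simp) (by simp [hs])]
        simp only [pvEmit, pvSplitc, if_neg hc, pvTok]
        have h1 : (cur ++ pend ++ [c]).isEmpty = false := by simp
        rw [h1]
        cases hce : cur.isEmpty
        · simp [List.append_assoc]
        · have hcur : cur = [] := List.isEmpty_iff.mp hce
          subst hcur
          have : PySem.Chars.lstrip (c :: (pvSplitc rest).1) = c :: (pvSplitc rest).1 := by
            simp [PySem.Chars.lstrip, hs]
          simp [this, List.append_assoc]

lemma pv_ofList_ne_empty (cs : List Char) : ((String.ofList cs) != "") = !cs.isEmpty := by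
  cases hcs : cs.isEmpty
  · have h : cs ≠ [] := by simpa using hcs
    simp only [Bool.not_false]
    rw [bne_iff_ne]
    intro hcon
    exact h (by simpa using congrArg String.toList hcon)
  · have h : cs = [] := List.isEmpty_iff.mp hcs
    subst h; decide

-- A's parse (split, strip, drop empties) equals B's machine run
lemma pv_parse_eq (text_prompt : String) :
    ((((PySem.Str.split? text_prompt ",").getD []).map PySem.Str.strip).filter
        (fun obj => obj != ""))
      = (((text_prompt ++ ",").toList.foldl pvStep ([], [], []))).1 := by
  have htl : (text_prompt ++ ",").toList = text_prompt.toList ++ [','] := by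
    simp [String.toList_append]
  rw [htl, pv_machine text_prompt.toList [] [] [] (by simp) (by simp)]
  simp only [PySem.Str.split?, PySem.Chars.split?]
  have hsep : ((",":String).toList) = [','] := by decide
  rw [hsep]
  simp only [List.isEmpty_cons, Bool.false_eq_true, if_false, Option.map_some, Option.getD_some,
    pv_splitOn_eq, List.nil_append, pvEmit, pvTok, List.isEmpty_nil]
  rw [List.map_map]
  simp only [Function.comp_def, List.map_cons, List.filter_cons, reduceIte]
  have hstrip : ∀ cs : List Char, PySem.Str.strip (String.ofList cs) = String.ofList (PySem.Chars.strip cs) := by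
    intro cs; simp [PySem.Str.strip]
  have hmap : ∀ ts : List (List Char),
      (ts.map (fun cs => PySem.Str.strip (String.ofList cs))).filter (fun obj => obj != "")
        = ((ts.map PySem.Chars.strip).filter (fun t => !t.isEmpty)).map String.ofList := by
    intro ts
    induction ts with
    | nil => rfl
    | cons t ts iht =>
      simp only [List.map_cons, List.filter_cons, hstrip, pv_ofList_ne_empty]
      cases h : (PySem.Chars.strip t).isEmpty <;> simp_all
  rw [hstrip, pv_ofList_ne_empty, hmap]
  have hst : PySem.Chars.rstrip (PySem.Chars.lstrip (pvSplitc text_prompt.toList).1)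
      = PySem.Chars.strip (pvSplitc text_prompt.toList).1 := rfl
  rw [hst]
  cases h : (PySem.Chars.strip (pvSplitc text_prompt.toList).1).isEmpty <;> simp_all

-- A's growing-list membership loop equals base ++ pvAddLoop on a seen-set
lemma pv_add (cs : List String) (cls : List String) (seen : PySem.Set String)
    (hinv : ∀ x, PySem.Set.contains seen x = cls.contains x) :
    cs.foldl (fun cls c => if cls.contains c then cls else cls ++ [c]) cls
      = cls ++ pvAddLoop seen cs := by
  induction cs generalizing cls seen with
  | nil => simp [pvAddLoop]
  | cons c cs ih =>
    simp only [List.foldl_cons, pvAddLoop, hinv c]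
    cases h : cls.contains c with
    | true => simp only [if_true, ih cls seen hinv]
    | false =>
      have hseen : PySem.Set.contains seen c = false := (hinv c).trans h
      rw [if_neg (by simp), ih (cls ++ [c]) (PySem.Set.add seen c) ?_, List.append_assoc]
      · rfl
      · intro x
        have hcs : c ∉ seen := by simpa [PySem.Set.contains] using hseen
        have h2 : decide (x ∈ seen) = decide (x ∈ cls) := by
          simpa [PySem.Set.contains] using hinv x
        simp [PySem.Set.add, hcs, PySem.Set.contains, h2]

lemma pv_ofList_contains (xs : List String) (x : String) :
    (PySem.Set.ofList xs).contains x = xs.contains x := by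
  rw [← PySem.List.dedup_eq_ofList]
  simp [PySem.Set.contains]

-- m sequential filter passes equal one filter with Source B's keep predicate
-- pv_add specialised to B's initial seen-set
lemma pv_add_set (cs : List String) (xs : List String) :
    cs.foldl (fun cls c => if cls.contains c then cls else cls ++ [c]) xs
      = xs ++ pvAddLoop (PySem.Set.ofList xs) cs :=
  pv_add cs xs (PySem.Set.ofList xs) (pv_ofList_contains xs)

lemma pv_remove (rs : List String) (cls : List String) :
    rs.foldl (fun cls c => cls.filter (fun obj => !(PySem.Str.isIn c (PySem.Str.lower obj)))) cls
      = cls.filter (pvKeep rs) := by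
  induction rs generalizing cls with
  | nil =>
    simp only [List.foldl_nil]
    exact (List.filter_eq_self.mpr (fun a _ => by simp [pvKeep])).symm
  | cons r rs ih =>
    simp only [List.foldl_cons, ih, List.filter_filter]
    congr 1
    funext obj
    simp only [pvKeep, List.any_cons]
    cases hA : PySem.Str.isIn r (PySem.Str.lower obj) <;> simp

-- ===== VERDICT (by name: the statement is the Claim_ definition above) =====
theorem process_tag_classes_spec : Claim_equal_process_tag_classes := by
  intro text_prompt add_classes remove_classes _
  unfold Spec_process_tag_classes process_tag_classes process_tag_classes_alt
  simp only [pv_parse_eq, pv_add_set, pv_remove, List.filter_append]
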